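-- pv_equiv track=rewrite | github.com/goplus/llgo | _lldb/llgo_plugin.py | map_type_name
-- ===== SOURCE A (Python) =====
-- from typing import List, Optional, Dict, Any, Tuple
--
-- def map_type_name(type_name: str) -> str:
--     # Handle pointer types
--     if type_name.endswith('*'):
--         base_type = type_name[:-1].strip()
--         mapped_base_type = map_type_name(base_type)
--         return f"*{mapped_base_type}"
--
--     # Map other types
--     type_mapping: Dict[str, str] = {
--         'long': 'int',
--         'void': 'unsafe.Pointer',
--         'char': 'byte',
--         'short': 'int16',
--         'int': 'int32',
--         'long long': 'int64',
--         'unsigned char': 'uint8',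
--         'unsigned short': 'uint16',
--         'unsigned int': 'uint32',
--         'unsigned long': 'uint',
--         'unsigned long long': 'uint64',
--         'float': 'float32',
--         'double': 'float64',
--     }
--
--     for c_type, go_type in type_mapping.items():
--         if type_name.startswith(c_type):
--             return type_name.replace(c_type, go_type, 1)
--
--     return type_name
-- ===== SOURCE B (Python) =====
-- def map_type_name(type_name: str) -> str:
--     # Single right-to-left scan: count trailing '*'s (skipping the whitespace
--     # A's per-level strip would eat) in one pass instead of A's recursion,
--     # then a first-match table lookup via next() with direct prefix substitution.
--     count = 0
--     base = type_name
--     if type_name.endswith('*'):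
--         rev = type_name[::-1]
--         i = 0
--         while i < len(rev) and (rev[i] == '*' or rev[i].isspace()):
--             if rev[i] == '*':
--                 count += 1
--             i += 1
--         base = rev[i:][::-1].lstrip()
--
--     type_mapping = [
--         ('long', 'int'),
--         ('void', 'unsafe.Pointer'),
--         ('char', 'byte'),
--         ('short', 'int16'),
--         ('int', 'int32'),
--         ('long long', 'int64'),
--         ('unsigned char', 'uint8'),
--         ('unsigned short', 'uint16'),
--         ('unsigned int', 'uint32'),
--         ('unsigned long', 'uint'),
--         ('unsigned long long', 'uint64'),
--         ('float', 'float32'),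
--         ('double', 'float64'),
--     ]
--     hit = next(((c, g) for c, g in type_mapping if base.startswith(c)), None)
--     if hit is None:
--         return '*' * count + base
--     c, g = hit
--     return '*' * count + g + base[len(c):]
-- ===== Notes on version B (the rewrite author's own statement) =====
-- stated objective: alternative
-- what changed: Replaces A's recursive peel-strip-recurse pointer handling with a single right-to-left scan that counts '*'s while skipping interleaved whitespace (plus one final lstrip), and replaces the for-loop with replace(...,1) by a next()-based first-match lookup with direct prefix substitution.
import Mathlib
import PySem

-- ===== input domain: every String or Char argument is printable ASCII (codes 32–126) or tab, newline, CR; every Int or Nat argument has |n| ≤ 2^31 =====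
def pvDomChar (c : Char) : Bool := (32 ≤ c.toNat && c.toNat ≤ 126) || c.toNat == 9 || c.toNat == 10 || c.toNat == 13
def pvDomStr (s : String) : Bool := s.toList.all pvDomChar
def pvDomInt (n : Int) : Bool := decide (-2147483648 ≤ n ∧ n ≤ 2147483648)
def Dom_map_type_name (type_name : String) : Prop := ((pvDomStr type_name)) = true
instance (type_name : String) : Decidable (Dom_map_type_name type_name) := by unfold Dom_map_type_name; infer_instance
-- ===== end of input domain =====

-- B replaces A's recursive peel/strip pointer handling by ONE right-to-left scan that counts
-- '*'s while skipping interleaved whitespace (then a final lstrip), and the replace(...,1)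
-- loop by a first-match (find?/next) lookup with direct prefix substitution; objective: alternative.

-- the fixed type_mapping table, in A's dict insertion order (shared data, used by both ports)
def pvMapping : List (List Char × List Char) :=
  [("long".toList, "int".toList),
   ("void".toList, "unsafe.Pointer".toList),
   ("char".toList, "byte".toList),
   ("short".toList, "int16".toList),
   ("int".toList, "int32".toList),
   ("long long".toList, "int64".toList),
   ("unsigned char".toList, "uint8".toList),
   ("unsigned short".toList, "uint16".toList),
   ("unsigned int".toList, "uint32".toList),
   ("unsigned long".toList, "uint".toList),
   ("unsigned long long".toList, "uint64".toList),
   ("float".toList, "float32".toList),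
   ("double".toList, "float64".toList)]

-- termination lemma used by port A: peeling one '*' and stripping shrinks the string
theorem pvPeelDec (cs : List Char) (h : PySem.Chars.endswith cs ('*'.toString).toList = true) :
    (PySem.Chars.strip (PySem.Chars.slice cs none (some (-1)))).length < cs.length := by
  have hne : cs ≠ [] := by
    rcases (PySem.Chars.endswith_iff cs _).1 h with ⟨t, ht⟩
    intro hc; subst hc; simp at ht
  have h1 : PySem.Chars.slice cs none (some (-1)) = cs.dropLast := by
    simp [PySem.Chars.slice_eq_listSlice, PySem.List.slice_to_neg_one]
  have h2 : ∀ xs : List Char, (PySem.Chars.strip xs).length ≤ xs.length := by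
    intro xs
    simp only [PySem.Chars.strip, PySem.Chars.lstrip, PySem.Chars.rstrip]
    calc (List.dropWhile PySem.Chars.isspace
            (List.dropWhile PySem.Chars.isspace xs).reverse).reverse.length
        = (List.dropWhile PySem.Chars.isspace
            (List.dropWhile PySem.Chars.isspace xs).reverse).length := by simp
      _ ≤ (List.dropWhile PySem.Chars.isspace xs).reverse.length :=
          List.length_dropWhile_le _ _
      _ = (List.dropWhile PySem.Chars.isspace xs).length := by simp
      _ ≤ xs.length := List.length_dropWhile_le _ _
  calc (PySem.Chars.strip (PySem.Chars.slice cs none (some (-1)))).length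
      ≤ (PySem.Chars.slice cs none (some (-1))).length := h2 _
    _ = cs.dropLast.length := by rw [h1]
    _ < cs.length := by
        have := List.length_pos_iff.2 hne
        simp [List.length_dropLast]; omega

-- ===== PORT A =====
-- type_name.replace(old, new, 1): replace the first occurrence only (exact, incl. old = '')
def pvReplaceOnce (cs old new : List Char) : List Char :=
  let i := PySem.Chars.find cs old
  if i = -1 then cs else cs.take i.toNat ++ new ++ cs.drop (i.toNat + old.length)

-- the 'for c_type, go_type in type_mapping.items()' loop
def pvLookupA (cs : List Char) : List (List Char × List Char) → List Char
  | [] => cs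
  | (c, g) :: rest =>
      if PySem.Chars.startswith cs c then pvReplaceOnce cs c g else pvLookupA cs rest

def pvGoA (cs : List Char) : List Char :=
  if PySem.Chars.endswith cs ('*'.toString).toList then
    '*' :: pvGoA (PySem.Chars.strip (PySem.Chars.slice cs none (some (-1))))
  else pvLookupA cs pvMapping
termination_by cs.length
decreasing_by exact pvPeelDec cs (by assumption)

def map_type_name (type_name : String) : String := String.mk (pvGoA type_name.toList)

-- ===== PORT B =====
-- Source B's index loop over rev = type_name[::-1], ported as structural recursion on the
-- reversed char list: skip '*' (counting) and whitespace, stop at the first other char;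
-- returns (rev[i:], count).
def pvScan : List Char → Nat → List Char × Nat
  | [], n => ([], n)
  | c :: rest, n =>
      if c = '*' then pvScan rest (n + 1)
      else if PySem.Chars.isspace c then pvScan rest n
      else (c :: rest, n)

-- Source B's peel stage: count = 0, base = type_name unless it ends with '*', in which case
-- scan from the right and base = rev[i:][::-1].lstrip()
def pvF (cs : List Char) : List Char × Nat :=
  if PySem.Chars.endswith cs ('*'.toString).toList then
    (PySem.Chars.lstrip (pvScan cs.reverse 0).1.reverse, (pvScan cs.reverse 0).2)
  else (cs, 0)

-- next(((c,g) for c,g in mapping if base.startswith(c)), None) is List.find?;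
-- '*' * count + g + base[len(c):] built directly
def map_type_name_alt (type_name : String) : String :=
  let p := pvF type_name.toList
  match pvMapping.find? (fun e => PySem.Chars.startswith p.1 e.1) with
  | some e => String.mk (List.replicate p.2 '*' ++
      (e.2 ++ PySem.Chars.slice p.1 (some (e.1.length : Int)) none))
  | none => String.mk (List.replicate p.2 '*' ++ p.1)

-- ===== PRECONDITION & SPEC =====
def Spec_map_type_name (type_name : String) (out : String) : Prop := out = map_type_name_alt type_name
instance (type_name : String) (out : String) : Decidable (Spec_map_type_name type_name out) := by unfold Spec_map_type_name; infer_instance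

-- ===== CLAIM =====
def Claim_equal_map_type_name : Prop := ∀ (type_name : String), Dom_map_type_name type_name → Spec_map_type_name type_name (map_type_name type_name)

-- ===== LEMMAS AND PROOFS =====

theorem pvFind_of_prefix (cs c : List Char) (h : c <+: cs) : PySem.Chars.find cs c = 0 := by
  have hnn : 0 ≤ PySem.Chars.find cs c :=
    (PySem.Chars.find_nonneg_iff cs c).2 h.isInfix
  obtain ⟨hpre, hmin⟩ := PySem.Chars.find_spec hnn
  by_contra hne
  have hpos : 0 < (PySem.Chars.find cs c).toNat := by omega
  exact hmin 0 hpos (by simpa using h)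

theorem pvReplaceOnce_of_startswith (cs c g : List Char)
    (h : PySem.Chars.startswith cs c = true) :
    pvReplaceOnce cs c g = g ++ cs.drop c.length := by
  have hp : c <+: cs := (PySem.Chars.startswith_iff cs c).1 h
  simp [pvReplaceOnce, pvFind_of_prefix cs c hp]

-- A's lookup loop computes exactly B's find?-based lookup
theorem pvLookup_eq (cs : List Char) :
    ∀ maps : List (List Char × List Char),
      pvLookupA cs maps =
        (match maps.find? (fun e => PySem.Chars.startswith cs e.1) with
         | some e => e.2 ++ PySem.Chars.slice cs (some (e.1.length : Int)) none
         | none => cs) := by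
  intro maps
  induction maps with
  | nil => rfl
  | cons p rest ih =>
      obtain ⟨c, g⟩ := p
      by_cases h : PySem.Chars.startswith cs c = true
      · simp [pvLookupA, List.find?, h, pvReplaceOnce_of_startswith cs c g h,
          PySem.Chars.slice_eq_listSlice, PySem.List.slice_from_natCast]
      · simp [pvLookupA, List.find?, h, ih]

theorem pvScan_shift (l : List Char) : ∀ k, pvScan l k = ((pvScan l 0).1, (pvScan l 0).2 + k) := by
  induction l with
  | nil => intro k; simp [pvScan]
  | cons c rest ih =>
      intro k
      by_cases hs : c = '*'
      · simp only [pvScan, hs]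
        rw [ih (k + 1), ih 1]
        simp
        omega
      · by_cases hw : PySem.Chars.isspace c = true
        · simp only [pvScan, if_neg hs, if_pos hw]
          rw [ih k]
        · simp [pvScan, hs, hw]

theorem pvScan_ws (w : List Char) (hw : ∀ c ∈ w, PySem.Chars.isspace c = true) :
    ∀ t k, pvScan (w ++ t) k = pvScan t k := by
  induction w with
  | nil => intro t k; rfl
  | cons c rest ih =>
      intro t k
      have hc : PySem.Chars.isspace c = true := hw c (by simp)
      have hns : c ≠ '*' := by
        intro h; subst h
        have : PySem.Chars.isspace '*' = false := by decide
        simp [this] at hc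
      simp only [List.cons_append, pvScan, if_neg hns, if_pos hc]
      exact ih (fun c h => hw c (by simp [h])) t k

theorem pvScan_append_of_ne_nil (x : List Char) :
    ∀ k y, (pvScan x k).1 ≠ [] →
      pvScan (x ++ y) k = ((pvScan x k).1 ++ y, (pvScan x k).2) := by
  induction x with
  | nil => intro k y h; simp [pvScan] at h
  | cons c rest ih =>
      intro k y h
      by_cases hs : c = '*'
      · simp only [pvScan, hs] at h ⊢
        simp only [List.cons_append, pvScan]
        exact ih (k + 1) y h
      · by_cases hw : PySem.Chars.isspace c = true
        · simp only [pvScan, if_neg hs, if_pos hw] at h ⊢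
          simp only [List.cons_append, pvScan, if_neg hs, if_pos hw]
          exact ih k y h
        · simp [pvScan, hs, hw]

theorem pvScan_append_of_nil (x : List Char) :
    ∀ k y, (pvScan x k).1 = [] → pvScan (x ++ y) k = pvScan y (pvScan x k).2 := by
  induction x with
  | nil => intro k y h; simp [pvScan]
  | cons c rest ih =>
      intro k y h
      by_cases hs : c = '*'
      · simp only [pvScan, hs] at h ⊢
        simp only [List.cons_append, pvScan]
        exact ih (k + 1) y h
      · by_cases hw : PySem.Chars.isspace c = true
        · simp only [pvScan, if_neg hs, if_pos hw] at h ⊢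
          simp only [List.cons_append, pvScan, if_neg hs, if_pos hw]
          exact ih k y h
        · simp [pvScan, hs, hw] at h

-- head of a dropWhile-result falsifies the predicate
theorem pvHead_dropWhile {p : Char → Bool} {l : List Char} {c : Char} {t : List Char}
    (h : List.dropWhile p l = c :: t) : p c = false := by
  induction l with
  | nil => simp at h
  | cons a rest ih =>
      by_cases ha : p a = true
      · rw [List.dropWhile_cons_of_pos ha] at h; exact ih h
      · rw [List.dropWhile_cons_of_neg ha] at h
        injection h with h1 _
        subst h1
        exact Bool.eq_false_iff.mpr ha

-- dropWhile skips an all-whitespace prefix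
theorem pvDropWhile_ws_append (w t : List Char)
    (hw : ∀ c ∈ w, PySem.Chars.isspace c = true) :
    List.dropWhile PySem.Chars.isspace (w ++ t) = List.dropWhile PySem.Chars.isspace t := by
  induction w with
  | nil => rfl
  | cons a rest ih =>
      rw [List.cons_append, List.dropWhile_cons_of_pos (hw a (by simp))]
      exact ih fun c hc => hw c (by simp [hc])

-- the key step: one recursion level of A corresponds to one counted star in B's scan
theorem pvF_step (cs : List Char) (h : PySem.Chars.endswith cs ('*'.toString).toList = true) :
    pvF cs =
      ((pvF (PySem.Chars.strip (PySem.Chars.slice cs none (some (-1))))).1,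
       (pvF (PySem.Chars.strip (PySem.Chars.slice cs none (some (-1))))).2 + 1) := by
  have hstar : ('*'.toString).toList = ['*'] := by decide
  rcases (PySem.Chars.endswith_iff cs _).1 h with ⟨d, hd⟩
  rw [hstar] at hd
  subst hd
  have hslice : PySem.Chars.slice (d ++ ['*']) none (some (-1)) = d := by
    simp [PySem.Chars.slice_eq_listSlice, PySem.List.slice_to_neg_one]
  rw [hslice]
  -- names: m = lstrip d, w = leading whitespace of d, e = strip d = rstrip m
  set m := List.dropWhile PySem.Chars.isspace d with hm
  set w := List.takeWhile PySem.Chars.isspace d with hww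
  have hwws : ∀ c ∈ w, PySem.Chars.isspace c = true := fun c hc => List.mem_takeWhile_imp hc
  have hdwm : d = w ++ m := (List.takeWhile_append_dropWhile).symm
  set e := (List.dropWhile PySem.Chars.isspace m.reverse).reverse with he
  have hdrop : List.dropWhile PySem.Chars.isspace m.reverse = e.reverse := by
    rw [he, List.reverse_reverse]
  have hstrip : PySem.Chars.strip d = e := by
    simp only [PySem.Chars.strip, PySem.Chars.lstrip, PySem.Chars.rstrip, ← hm, he]
  rw [hstrip]
  have hmrev : m.reverse = List.takeWhile PySem.Chars.isspace m.reverse ++ e.reverse := by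
    rw [← hdrop, List.takeWhile_append_dropWhile]
  have hmws : ∀ c ∈ List.takeWhile PySem.Chars.isspace m.reverse,
      PySem.Chars.isspace c = true := fun c hc => List.mem_takeWhile_imp hc
  -- scanning m.reverse = scanning e.reverse
  have hscan_m : ∀ k, pvScan m.reverse k = pvScan e.reverse k := by
    intro k; rw [hmrev]; exact pvScan_ws _ hmws _ k
  -- the full input's reversed list
  have hrev : (d ++ ['*']).reverse = '*' :: (m.reverse ++ w.reverse) := by
    rw [hdwm]; simp
  have hF1 : pvF (d ++ ['*']) =
      (PySem.Chars.lstrip (pvScan (m.reverse ++ w.reverse) 1).1.reverse,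
       (pvScan (m.reverse ++ w.reverse) 1).2) := by
    rw [pvF, if_pos h, hrev]
    simp [pvScan]
  set r := (pvScan e.reverse 0).1 with hr
  set n := (pvScan e.reverse 0).2 with hn
  have hm1 : pvScan m.reverse 1 = (r, n + 1) := by
    rw [hscan_m 1, pvScan_shift e.reverse 1]
  by_cases hrnil : r = []
  · -- everything right of the base is stars/whitespace; the base becomes []
    have h1 : pvScan (m.reverse ++ w.reverse) 1 = ([], n + 1) := by
      have h2 := pvScan_append_of_nil m.reverse 1 w.reverse (by rw [hm1, hrnil])
      rw [hm1] at h2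
      rw [h2]
      have h3 : pvScan (w.reverse ++ ([] : List Char)) (n + 1) = pvScan [] (n + 1) :=
        pvScan_ws w.reverse (fun c hc => hwws c (by simpa using hc)) [] (n + 1)
      simpa [pvScan] using h3
    rw [hF1, h1]
    by_cases hee : e = []
    · have h4 : pvF e = (e, 0) := by
        rw [pvF, if_neg]
        intro hend
        rcases (PySem.Chars.endswith_iff e _).1 hend with ⟨t, ht⟩
        rw [hee, hstar] at ht
        simp at ht
      rw [h4]
      have hn0 : n = 0 := by rw [hn, hee]; simp [pvScan]
      simp [hee, hn0, PySem.Chars.lstrip]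
    · -- e nonempty and fully scanned ⇒ e ends with '*'
      have herev : e.reverse ≠ [] := by simpa using hee
      rcases List.exists_cons_of_ne_nil herev with ⟨c, t, hct⟩
      have hcw : PySem.Chars.isspace c = false :=
        pvHead_dropWhile (by rw [hdrop, hct])
      have hcstar : c = '*' := by
        by_contra hne
        have h5 : pvScan e.reverse 0 = (c :: t, 0) := by
          rw [hct]; simp [pvScan, hne, hcw]
        have h6 : r = c :: t := by rw [hr, h5]
        rw [hrnil] at h6; exact absurd h6 (by simp)
      have hend : PySem.Chars.endswith e ('*'.toString).toList = true := by
        rw [hstar]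
        apply (PySem.Chars.endswith_iff e _).2
        exact ⟨t.reverse, by rw [← List.reverse_reverse e, hct, hcstar]; simp⟩
      rw [pvF, if_pos hend, ← hr, ← hn, hrnil]
  · -- the scan stops inside the stripped base
    have h1 : pvScan (m.reverse ++ w.reverse) 1 = (r ++ w.reverse, n + 1) := by
      have h2 := pvScan_append_of_ne_nil m.reverse 1 w.reverse (by rw [hm1]; exact hrnil)
      rw [hm1] at h2; simpa using h2
    have hlstrip : PySem.Chars.lstrip (r ++ w.reverse).reverse = PySem.Chars.lstrip r.reverse := by
      simp only [PySem.Chars.lstrip, List.reverse_append, List.reverse_reverse]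
      exact pvDropWhile_ws_append w r.reverse hwws
    rw [hF1, h1, hlstrip]
    by_cases hend : PySem.Chars.endswith e ('*'.toString).toList = true
    · rw [pvF, if_pos hend, ← hr, ← hn]
    · -- e ends with a non-star non-space char: B's scan of e.reverse stops immediately
      have hee : e ≠ [] := by
        intro hnil
        apply hrnil
        rw [hr, hnil]
        simp [pvScan]
      have herev : e.reverse ≠ [] := by simpa using hee
      rcases List.exists_cons_of_ne_nil herev with ⟨c, t, hct⟩
      have hcw : PySem.Chars.isspace c = false :=
        pvHead_dropWhile (by rw [hdrop, hct])
      have hcstar : c ≠ '*' := by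
        intro hc
        apply hend
        rw [hstar]
        apply (PySem.Chars.endswith_iff e _).2
        exact ⟨t.reverse, by rw [← List.reverse_reverse e, hct, hc]; simp⟩
      have hscan_e : pvScan e.reverse 0 = (e.reverse, 0) := by
        rw [hct]; simp [pvScan, hcstar, hcw]
      have hr' : r = e.reverse := by rw [hr, hscan_e]
      have hn' : n = 0 := by rw [hn, hscan_e]
      -- e is a nonempty prefix of m = lstrip d, so its head is non-whitespace
      have hpre : e <+: m := by
        apply List.reverse_suffix.1
        rw [← hdrop]
        exact List.dropWhile_suffix _
      have hlste : PySem.Chars.lstrip e = e := by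
        rcases List.exists_cons_of_ne_nil hee with ⟨c0, t0, hect⟩
        rcases hpre with ⟨rest, hrest⟩
        have hm0 : m = c0 :: (t0 ++ rest) := by rw [← hrest, hect]; simp
        have hc0 : PySem.Chars.isspace c0 = false :=
          pvHead_dropWhile (l := d) (by rw [← hm]; exact hm0)
        rw [PySem.Chars.lstrip, hect, List.dropWhile_cons_of_neg (by simp [hc0])]
      rw [pvF, if_neg hend, hr', hn', List.reverse_reverse, hlste]

-- A's recursion computes B's (scan, lookup) composition
theorem pvGoA_eq (cs : List Char) :
    pvGoA cs = List.replicate (pvF cs).2 '*' ++ pvLookupA (pvF cs).1 pvMapping := by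
  induction cs using pvGoA.induct with
  | case1 cs h ih =>
      rw [pvGoA, if_pos h, ih, pvF_step cs h]
      simp [List.replicate_succ]
  | case2 cs h =>
      rw [pvGoA, if_neg h, pvF, if_neg h]
      simp

-- ===== VERDICT (by name: the statement is the Claim_ definition above) =====
theorem map_type_name_spec : Claim_equal_map_type_name := by
  intro s _
  unfold Spec_map_type_name map_type_name map_type_name_alt
  rw [pvGoA_eq, pvLookup_eq]
  cases hfind : pvMapping.find? (fun e => PySem.Chars.startswith (pvF s.toList).1 e.1) with
  | none => simp [hfind]
  | some e => simp [hfind]
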